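-- pv_equiv track=rewrite | github.com/Shriiii01/prompter | backend/app/services/together.py | _is_simple_prompt
-- ===== SOURCE A (Python) =====
-- def _is_simple_prompt(prompt: str) -> bool:
--     """Check if prompt is too simple to enhance"""
--     # Only skip enhancement for very basic greetings
--     simple_greetings = [
--         "hello", "hi", "hey", "how are you", "what's up", "how's it going",
--         "good morning", "good afternoon", "good evening", "thanks", "thank you", "bye", "goodbye"
--     ]
--
--     prompt_lower = prompt.lower().strip()
--
--     # Only return True for exact matches to simple greetings
--     for greeting in simple_greetings:
--         if prompt_lower == greeting or prompt_lower == greeting + "!" or prompt_lower == greeting + ".":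
--             return True
--
--     # Very short single word responses
--     if len(prompt.split()) <= 2 and prompt_lower in ["yes", "no", "ok", "okay", "sure"]:
--         return True
--
--     # Everything else should be enhanced
--     return False
-- ===== SOURCE B (Python) =====
-- _GREETINGS = [
--     "hello", "hi", "hey", "how are you", "what's up", "how's it going",
--     "good morning", "good afternoon", "good evening", "thanks", "thank you", "bye", "goodbye"
-- ]
--
-- # All accepted forms, expanded once and sorted so lookups can binary-search.
-- _VARIANTS = sorted(g + suf for g in _GREETINGS for suf in ("", "!", "."))
-- _AFFIRMATIVES = sorted(["yes", "no", "ok", "okay", "sure"])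
--
--
-- def _bsearch(arr, key):
--     lo, hi = 0, len(arr)
--     while lo < hi:
--         mid = (lo + hi) // 2
--         if arr[mid] == key:
--             return True
--         if key < arr[mid]:
--             hi = mid
--         else:
--             lo = mid + 1
--     return False
--
--
-- def _is_simple_prompt(prompt: str) -> bool:
--     """Check if prompt is too simple to enhance"""
--     pl = prompt.lower().strip()
--     if _bsearch(_VARIANTS, pl):
--         return True
--     return len(prompt.split()) <= 2 and _bsearch(_AFFIRMATIVES, pl)
-- ===== Notes on version B (the rewrite author's own statement) =====
-- stated objective: alternative
-- what changed: Replaces A's per-greeting loop that builds and compares three concatenated variants of each greeting at query time with a sorted table of all 39 expanded variants built once at import, queried by a hand-written binary search (the affirmatives list is likewise sorted and binary-searched under the same length guard).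
import Mathlib
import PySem

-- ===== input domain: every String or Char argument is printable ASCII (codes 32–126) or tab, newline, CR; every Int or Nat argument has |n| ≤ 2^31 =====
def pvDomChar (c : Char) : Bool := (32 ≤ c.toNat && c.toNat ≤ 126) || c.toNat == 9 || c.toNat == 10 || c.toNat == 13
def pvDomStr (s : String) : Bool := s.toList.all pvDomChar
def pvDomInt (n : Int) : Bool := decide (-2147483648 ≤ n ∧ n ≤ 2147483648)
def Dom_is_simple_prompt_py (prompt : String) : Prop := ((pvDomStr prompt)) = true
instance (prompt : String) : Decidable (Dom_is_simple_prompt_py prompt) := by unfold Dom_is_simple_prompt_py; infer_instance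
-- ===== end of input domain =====

-- B expands all accepted greeting variants into one sorted table built once and answers a
-- query by hand-written binary search, instead of A's per-greeting loop that concatenates
-- three variants per greeting at query time — objective: alternative.

-- ===== PORT A =====
def pvGreetingsA : List (List Char) :=
  ["hello".toList, "hi".toList, "hey".toList, "how are you".toList, "what's up".toList,
   "how's it going".toList, "good morning".toList, "good afternoon".toList,
   "good evening".toList, "thanks".toList, "thank you".toList, "bye".toList, "goodbye".toList]

-- the 'for greeting in simple_greetings' loop of A
def pvLoopA (pl : List Char) : List (List Char) → Bool
  | [] => false
  | g :: rest =>
      if pl = g ∨ pl = g ++ ['!'] ∨ pl = g ++ ['.'] then true else pvLoopA pl rest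

def is_simple_prompt_py (prompt : String) : Bool :=
  -- prompt_lower = prompt.lower().strip(), written inline
  if pvLoopA (PySem.Chars.strip (PySem.Chars.lower prompt.toList)) pvGreetingsA then true
  else if (PySem.Chars.split₀ prompt.toList).length ≤ 2 ∧
          PySem.Chars.strip (PySem.Chars.lower prompt.toList) ∈
            ["yes".toList, "no".toList, "ok".toList, "okay".toList, "sure".toList]
  then true
  else false

-- ===== PORT B =====
def pvGreetingsB : List (List Char) :=
  ["hello".toList, "hi".toList, "hey".toList, "how are you".toList, "what's up".toList,
   "how's it going".toList, "good morning".toList, "good afternoon".toList,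
   "good evening".toList, "thanks".toList, "thank you".toList, "bye".toList, "goodbye".toList]

-- _VARIANTS = sorted(g + suf for g in _GREETINGS for suf in ("", "!", "."))
def pvVariantsB : List (List Char) :=
  PySem.List.sorted
    (pvGreetingsB.flatMap (fun g => [g ++ [], g ++ ['!'], g ++ ['.']]))
    (fun x => x) false

-- _AFFIRMATIVES = sorted(["yes", "no", "ok", "okay", "sure"])
def pvAffirmB : List (List Char) :=
  PySem.List.sorted
    ["yes".toList, "no".toList, "ok".toList, "okay".toList, "sure".toList]
    (fun x => x) false

-- the while-loop of _bsearch (lo, hi are the loop variables; arr[mid] is in range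
-- whenever hi ≤ len(arr), which holds at every call)
def pvBsearch (arr : List (List Char)) (key : List Char) (lo hi : Nat) : Bool :=
  if lo < hi then
    if arr.getD ((lo + hi) / 2) [] = key then true
    else if key < arr.getD ((lo + hi) / 2) [] then pvBsearch arr key lo ((lo + hi) / 2)
    else pvBsearch arr key ((lo + hi) / 2 + 1) hi
  else false
termination_by hi - lo
decreasing_by all_goals omega

def is_simple_prompt_py_alt (prompt : String) : Bool :=
  -- pl = prompt.lower().strip(), written inline
  if pvBsearch pvVariantsB (PySem.Chars.strip (PySem.Chars.lower prompt.toList)) 0 pvVariantsB.length then true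
  else decide ((PySem.Chars.split₀ prompt.toList).length ≤ 2) &&
       pvBsearch pvAffirmB (PySem.Chars.strip (PySem.Chars.lower prompt.toList)) 0 pvAffirmB.length

-- ===== PRECONDITION & SPEC =====
def Spec_is_simple_prompt_py (prompt : String) (out : Bool) : Prop := out = is_simple_prompt_py_alt prompt
instance (prompt : String) (out : Bool) : Decidable (Spec_is_simple_prompt_py prompt out) := by unfold Spec_is_simple_prompt_py; infer_instance

-- ===== CLAIM (what is proved, stated in full; the proofs are below) =====
def Claim_equal_is_simple_prompt_py : Prop := ∀ (prompt : String), Dom_is_simple_prompt_py prompt → Spec_is_simple_prompt_py prompt (is_simple_prompt_py prompt)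

-- ===== LEMMAS AND PROOFS =====

-- a (≤)-sorted list read through getD is monotone on in-range indices
theorem pv_mono (arr : List (List Char)) (hs : arr.Pairwise (· ≤ ·))
    {i j : Nat} (hij : i ≤ j) (hj : j < arr.length) :
    arr.getD i [] ≤ arr.getD j [] := by
  have hi : i < arr.length := lt_of_le_of_lt hij hj
  rw [List.getD_eq_getElem arr [] hi, List.getD_eq_getElem arr [] hj]
  rcases lt_or_eq_of_le hij with h | h
  · exact List.pairwise_iff_getElem.mp hs i j hi hj h
  · subst h; exact le_refl _

-- binary search on a (≤)-sorted list finds exactly the keys present in [lo, hi)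
theorem pv_bs_iff (arr : List (List Char)) (hs : arr.Pairwise (· ≤ ·)) (key : List Char) :
    ∀ (n lo hi : Nat), hi - lo ≤ n → hi ≤ arr.length →
      (pvBsearch arr key lo hi = true ↔ ∃ i, lo ≤ i ∧ i < hi ∧ arr.getD i [] = key) := by
  intro n
  induction n with
  | zero =>
    intro lo hi hn _
    rw [pvBsearch]
    have : ¬ lo < hi := by omega
    simp only [if_neg this, Bool.false_eq_true, false_iff]
    rintro ⟨i, h1, h2, _⟩; omega
  | succ n ih =>
    intro lo hi hn hhi
    rw [pvBsearch]
    by_cases hlt : lo < hi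
    · simp only [if_pos hlt]
      have hmlo : lo ≤ (lo + hi) / 2 := by omega
      have hmhi : (lo + hi) / 2 < hi := by omega
      have hmlen : (lo + hi) / 2 < arr.length := lt_of_lt_of_le hmhi hhi
      by_cases heq : arr.getD ((lo + hi) / 2) [] = key
      · simp only [if_pos heq, true_iff]
        exact ⟨(lo + hi) / 2, hmlo, hmhi, heq⟩
      · simp only [if_neg heq]
        by_cases hkey : key < arr.getD ((lo + hi) / 2) []
        · simp only [if_pos hkey]
          rw [ih lo ((lo + hi) / 2) (by omega) (le_of_lt hmlen)]
          constructor
          · rintro ⟨i, h1, h2, h3⟩; exact ⟨i, h1, lt_trans h2 hmhi, h3⟩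
          · rintro ⟨i, h1, h2, h3⟩
            refine ⟨i, h1, ?_, h3⟩
            by_contra hc
            have : arr.getD ((lo + hi) / 2) [] ≤ arr.getD i [] :=
              pv_mono arr hs (by omega) (lt_of_lt_of_le h2 hhi)
            rw [h3] at this
            exact absurd hkey (not_lt_of_ge this)
        · simp only [if_neg hkey]
          have hxk : arr.getD ((lo + hi) / 2) [] < key :=
            lt_of_le_of_ne (le_of_not_gt hkey) heq
          rw [ih ((lo + hi) / 2 + 1) hi (by omega) hhi]
          constructor
          · rintro ⟨i, h1, h2, h3⟩; exact ⟨i, by omega, h2, h3⟩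
          · rintro ⟨i, h1, h2, h3⟩
            refine ⟨i, ?_, h2, h3⟩
            by_contra hc
            have : arr.getD i [] ≤ arr.getD ((lo + hi) / 2) [] :=
              pv_mono arr hs (by omega) hmlen
            rw [h3] at this
            exact absurd hxk (not_lt_of_ge this)
    · simp only [if_neg hlt, Bool.false_eq_true, false_iff]
      rintro ⟨i, h1, h2, _⟩; omega

-- the full-range binary search is membership
theorem pv_bs_mem (arr : List (List Char)) (hs : arr.Pairwise (· ≤ ·)) (key : List Char) :
    pvBsearch arr key 0 arr.length = true ↔ key ∈ arr := by
  rw [pv_bs_iff arr hs key arr.length 0 arr.length (by omega) (le_refl _)]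
  constructor
  · rintro ⟨i, _, h2, h3⟩
    rw [List.getD_eq_getElem arr [] h2] at h3
    exact h3 ▸ List.getElem_mem h2
  · intro hm
    obtain ⟨i, hi, he⟩ := List.mem_iff_getElem.mp hm
    exact ⟨i, Nat.zero_le _, hi, by rw [List.getD_eq_getElem arr [] hi]; exact he⟩

-- A's loop over the greetings is membership in the expanded variant list
theorem pv_loop_mem (pl : List Char) (gs : List (List Char)) :
    pvLoopA pl gs = true ↔ pl ∈ gs.flatMap (fun g => [g ++ [], g ++ ['!'], g ++ ['.']]) := by
  induction gs with
  | nil => simp [pvLoopA]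
  | cons g rest ih =>
    simp only [pvLoopA, List.flatMap_cons, List.mem_append]
    by_cases h : pl = g ∨ pl = g ++ ['!'] ∨ pl = g ++ ['.']
    · simp only [if_pos h, true_iff]
      left
      rcases h with h | h | h <;> simp [h]
    · simp only [if_neg h]
      rw [ih]
      constructor
      · intro hm; right; exact hm
      · rintro (hm | hm)
        · exfalso; apply h
          simp only [List.mem_cons, List.append_nil] at hm
          rcases hm with hm | hm | hm
          · exact Or.inl hm
          · exact Or.inr (Or.inl hm)
          · rcases hm with hm | hfalse
            · exact Or.inr (Or.inr hm)
            · exact absurd hfalse (List.not_mem_nil)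
        · exact hm

theorem pv_variants_sorted : pvVariantsB.Pairwise (· ≤ ·) := by
  have := PySem.List.sorted_pairwise
    (pvGreetingsB.flatMap (fun g => [g ++ [], g ++ ['!'], g ++ ['.']])) (fun x => x)
  exact this

theorem pv_affirm_sorted : pvAffirmB.Pairwise (· ≤ ·) := by
  have := PySem.List.sorted_pairwise
    ["yes".toList, "no".toList, "ok".toList, "okay".toList, "sure".toList] (fun x => x)
  exact this

theorem pv_bs_variants (pl : List Char) :
    pvBsearch pvVariantsB pl 0 pvVariantsB.length = pvLoopA pl pvGreetingsA := by
  rw [Bool.eq_iff_iff, pv_bs_mem pvVariantsB pv_variants_sorted pl, pv_loop_mem, pvVariantsB,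
    PySem.List.mem_sorted, show pvGreetingsB = pvGreetingsA from rfl]

theorem pv_bs_affirm (pl : List Char) :
    pvBsearch pvAffirmB pl 0 pvAffirmB.length =
      decide (pl ∈ ["yes".toList, "no".toList, "ok".toList, "okay".toList, "sure".toList]) := by
  rw [Bool.eq_iff_iff, pv_bs_mem pvAffirmB pv_affirm_sorted pl, pvAffirmB,
    PySem.List.mem_sorted]
  simp

theorem is_simple_prompt_py_spec' (prompt : String) :
    is_simple_prompt_py prompt = is_simple_prompt_py_alt prompt := by
  unfold is_simple_prompt_py is_simple_prompt_py_alt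
  rw [pv_bs_variants, pv_bs_affirm]
  by_cases h : pvLoopA (PySem.Chars.strip (PySem.Chars.lower prompt.toList)) pvGreetingsA = true
  · simp [h]
  · simp only [Bool.not_eq_true] at h
    simp only [h, Bool.false_eq_true, if_false]
    by_cases hp : (PySem.Chars.split₀ prompt.toList).length ≤ 2 ∧
        PySem.Chars.strip (PySem.Chars.lower prompt.toList) ∈
          ["yes".toList, "no".toList, "ok".toList, "okay".toList, "sure".toList]
    · simp [hp.1]
    · rw [if_neg hp]
      rw [Classical.not_and_iff_not_or_not] at hp
      rcases hp with hp | hp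
      · simp [hp]
      · rw [decide_eq_false hp, Bool.and_false]

-- ===== VERDICT (by name: the statement is the Claim_ definition above) =====
theorem is_simple_prompt_py_spec : Claim_equal_is_simple_prompt_py := by
  intro prompt _
  exact is_simple_prompt_py_spec' prompt
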